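-- pv_equiv track=rewrite | github.com/heinzelmaennchen/discord | utils/misc.py | msgSplitter
-- ===== SOURCE A (Python) =====
-- MAX_MESSAGE_LENGTH = 1980
--
-- def msgSplitter(response):
--     responses = []
--     addCb = False
--     while len(response) > MAX_MESSAGE_LENGTH:
--         splitindex = response.rfind('\n', 0, MAX_MESSAGE_LENGTH)
--         if splitindex == -1:
--             splitindex = response.rfind(' ', 0, MAX_MESSAGE_LENGTH)
--
--         responses.append(response[:splitindex])
--         if addCb == True:
--             responses[-1] = f'```\n{responses[-1]}'
--             addCb = False
--         if responses[-1].count('```') % 2 != 0: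
--             responses[-1] += '```'
--             addCb = True
--         response = response[splitindex + 1:]
--     responses.append(response)
--     if addCb == True:
--         responses[-1] = f'```\n{responses[-1]}'
--         addCb = False
--     return responses
-- ===== SOURCE B (Python) =====
-- MAX_MESSAGE_LENGTH = 1980
--
--
-- def msgSplitter(response):
--     # Phase 1: compute the raw chunk slices only (no fence logic).
--     chunks = []
--     while len(response) > MAX_MESSAGE_LENGTH:
--         si = response.rfind('\n', 0, MAX_MESSAGE_LENGTH)
--         if si == -1:
--             si = response.rfind(' ', 0, MAX_MESSAGE_LENGTH)
--         chunks.append(response[:si])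
--         response = response[si + 1:]
--     chunks.append(response)
--     # Phase 2: thread the code-block fence state over the chunk list.
--     out = []
--     addCb = False
--     for chunk in chunks[:-1]:
--         if addCb:
--             chunk = '```\n' + chunk
--         addCb = chunk.count('```') % 2 != 0
--         if addCb:
--             chunk += '```'
--         out.append(chunk)
--     last = chunks[-1]
--     out.append('```\n' + last if addCb else last)
--     return out
-- ===== Notes on version B (the rewrite author's own statement) =====
-- stated objective: simpler
-- what changed: A fuses splitting and code-block-fence bookkeeping into one while loop that mutates its last appended element; B first computes the raw chunk slices in one pass and then threads the addCb fence state over that list in a second pass, special-casing only the last chunk.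
import Mathlib
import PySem

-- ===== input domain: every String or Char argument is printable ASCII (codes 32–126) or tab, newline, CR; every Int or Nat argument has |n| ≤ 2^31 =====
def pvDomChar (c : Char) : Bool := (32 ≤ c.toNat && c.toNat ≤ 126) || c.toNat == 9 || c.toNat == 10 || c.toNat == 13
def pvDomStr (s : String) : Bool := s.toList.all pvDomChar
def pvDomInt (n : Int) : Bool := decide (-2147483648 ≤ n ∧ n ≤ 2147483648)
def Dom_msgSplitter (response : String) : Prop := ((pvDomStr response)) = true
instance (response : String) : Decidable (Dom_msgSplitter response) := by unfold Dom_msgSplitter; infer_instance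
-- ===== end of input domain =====

-- B splits the work into two passes: phase 1 computes the raw chunk slices only, phase 2 threads
-- the code-block-fence state over that list (objective: simpler decomposition, same cost).

-- ===== PORT A =====
-- splitindex: rfind of newline in the first 1980 characters, falling back to rfind of space on -1
-- (shared by both ports; each Python computes it by this exact code)
def pvSplitIdx (cs : List Char) : Int :=
  let si := PySem.Chars.rfindFrom cs ['\n'] 0 (some 1980)
  if si = -1 then PySem.Chars.rfindFrom cs [' '] 0 (some 1980) else si

-- A's while loop; fuel only makes the recursion total (Python A diverges where the fuel would run out,
-- and those inputs are excluded by Pre_msgSplitter)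
def pvLoopA : Nat → List Char → List (List Char) → Bool → List (List Char)
  | 0, cs, acc, addCb => acc ++ [if addCb then '`' :: '`' :: '`' :: '\n' :: cs else cs]
  | fuel + 1, cs, acc, addCb =>
    if 1980 < cs.length then
      let si := pvSplitIdx cs
      let c0 := PySem.Chars.slice cs none (some si)
      let c1 := if addCb then '`' :: '`' :: '`' :: '\n' :: c0 else c0
      if PySem.Chars.count c1 ['`', '`', '`'] % 2 ≠ 0 then
        pvLoopA fuel (PySem.Chars.slice cs (some (si + 1)) none) (acc ++ [c1 ++ ['`', '`', '`']]) true
      else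
        pvLoopA fuel (PySem.Chars.slice cs (some (si + 1)) none) (acc ++ [c1]) false
    else acc ++ [if addCb then '`' :: '`' :: '`' :: '\n' :: cs else cs]

def msgSplitter (response : String) : List String :=
  (pvLoopA response.toList.length response.toList [] false).map String.ofList

-- ===== PORT B =====
-- phase 1: the raw chunk slices (same fuel discipline as A's loop)
def pvChunksB : Nat → List Char → List (List Char)
  | 0, cs => [cs]
  | fuel + 1, cs =>
    if 1980 < cs.length then
      let si := pvSplitIdx cs
      PySem.Chars.slice cs none (some si) :: pvChunksB fuel (PySem.Chars.slice cs (some (si + 1)) none)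
    else [cs]

-- phase 2: fold the addCb state over the chunks; the last chunk only gets the prefix
def pvFenceB : List (List Char) → Bool → List (List Char)
  | [], _ => []
  | [c], addCb => [if addCb then '`' :: '`' :: '`' :: '\n' :: c else c]
  | c :: c' :: rest, addCb =>
    let c1 := if addCb then '`' :: '`' :: '`' :: '\n' :: c else c
    if PySem.Chars.count c1 ['`', '`', '`'] % 2 ≠ 0 then
      (c1 ++ ['`', '`', '`']) :: pvFenceB (c' :: rest) true
    else
      c1 :: pvFenceB (c' :: rest) false

def msgSplitter_alt (response : String) : List String :=
  (pvFenceB (pvChunksB response.toList.length response.toList) false).map String.ofList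

-- ===== PRECONDITION & SPEC =====
-- Pre_ excludes exactly the inputs on which Python A never returns: if some 1980-character window that is
-- followed by at least one further character contains neither a newline nor a space, A's while loop reaches
-- a splitindex of -1 on a too-long suffix and loops forever; the Lean ports are fuel-aligned, so the proof
-- itself is unconditional, but outside Pre_ neither Python returns.
def Pre_msgSplitter (response : String) : Prop :=
  ∀ i < response.toList.length, i + 1980 + 1 ≤ response.toList.length →
    ((response.toList.drop i).take 1980).any (fun c => c == '\n' || c == ' ') = true
instance (response : String) : Decidable (Pre_msgSplitter response) := by
  unfold Pre_msgSplitter; infer_instance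
def pvWitness_msgSplitter : String := "hello ```world```\nbye"

def Spec_msgSplitter (response : String) (out : List String) : Prop := out = msgSplitter_alt response
instance (response : String) (out : List String) : Decidable (Spec_msgSplitter response out) := by unfold Spec_msgSplitter; infer_instance

-- ===== CLAIM (what is proved, stated in full; the proofs are below) =====
def Claim_equal_msgSplitter : Prop := ∀ (response : String), Dom_msgSplitter response → Pre_msgSplitter response → Spec_msgSplitter response (msgSplitter response)

-- ===== LEMMAS AND PROOFS =====
lemma pvChunksB_ne_nil (fuel : Nat) (cs : List Char) : pvChunksB fuel cs ≠ [] := by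
  cases fuel with
  | zero => simp [pvChunksB]
  | succ fuel =>
    simp only [pvChunksB]
    split <;> simp

-- the key invariant: A's fused loop equals B's phase 2 applied to B's phase 1, for every fuel and state
lemma pvLoopA_eq (fuel : Nat) : ∀ (cs : List Char) (acc : List (List Char)) (addCb : Bool),
    pvLoopA fuel cs acc addCb = acc ++ pvFenceB (pvChunksB fuel cs) addCb := by
  induction fuel with
  | zero => intro cs acc addCb; simp [pvLoopA, pvChunksB, pvFenceB]
  | succ fuel ih =>
    intro cs acc addCb
    simp only [pvLoopA, pvChunksB]
    by_cases h : 1980 < cs.length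
    · simp only [if_pos h]
      obtain ⟨c', rest, hrest⟩ :
          ∃ c' rest, pvChunksB fuel (PySem.Chars.slice cs (some (pvSplitIdx cs + 1)) none) = c' :: rest := by
        rcases hne : pvChunksB fuel (PySem.Chars.slice cs (some (pvSplitIdx cs + 1)) none) with _ | ⟨c', rest⟩
        · exact absurd hne (pvChunksB_ne_nil _ _)
        · exact ⟨c', rest, rfl⟩
      rw [hrest]
      simp only [pvFenceB, ih, hrest]
      by_cases hcb : addCb = true <;> simp only [hcb, if_pos, if_neg, Bool.false_eq_true,
        not_false_eq_true] <;> split <;> simp_all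
    · simp [if_neg h, pvFenceB]

-- ===== VERDICT (by name: the statement is the Claim_ definition above) =====
theorem msgSplitter_spec : Claim_equal_msgSplitter := by
  intro response _ _
  unfold Spec_msgSplitter msgSplitter msgSplitter_alt
  rw [pvLoopA_eq]
  simp
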